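-- pv_equiv track=rewrite | github.com/MarcoMorik/GWSim | benchmark/scripts/helper.py | get_hyperparams
-- ===== SOURCE A (Python) =====
-- from itertools import product
--
-- def get_hyperparams(num_seeds=10, size="extended"):
--     if size == "small":
--         hyper_params = dict(
--             fewshot_lrs=['0.1', '0.01', '0.001'],
--             fewshot_ks=['-1'],
--             fewshot_epochs=['20'],
--             weight_decay=['0.0'],
--             weight_decay_type=["L2"],
--             seeds=[str(num) for num in range(num_seeds)],
--         )
--     elif size == "imagenet1k":
--         hyper_params = dict(
--             fewshot_lrs=['0.01', '0.001'],
--             fewshot_ks=['-1'],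
--             fewshot_epochs=['20'],
--             weight_decay=['1e-1', '1e-2', '1e-3', '1e-4', '1e-5', '1e-6'],
--             weight_decay_type=["L2", "L1"],
--             seeds=[str(num) for num in range(num_seeds)],
--         )
--     else:
--         hyper_params = dict(
--             fewshot_lrs=['0.1', '0.01'],
--             fewshot_ks=['-1', '5', '10', '100'],
--             fewshot_epochs=['10', '20', '30'],
--             weight_decay=['0.0'],
--             weight_decay_type=["L2"],
--             seeds=[str(num) for num in range(num_seeds)],
--         )
--     num_jobs = len(list(product(*hyper_params.values())))
--     return hyper_params, num_jobs
-- ===== SOURCE B (Python) =====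
-- def get_hyperparams(num_seeds=10, size="extended"):
--     # table-driven: per-size base grids (without seeds); num_jobs is the product of lengths
--     table = {
--         "small": (['0.1', '0.01', '0.001'], ['-1'], ['20'], ['0.0'], ["L2"]),
--         "imagenet1k": (['0.01', '0.001'], ['-1'], ['20'],
--                        ['1e-1', '1e-2', '1e-3', '1e-4', '1e-5', '1e-6'], ["L2", "L1"]),
--     }
--     lrs, ks, epochs, wd, wdt = table.get(
--         size, (['0.1', '0.01'], ['-1', '5', '10', '100'], ['10', '20', '30'], ['0.0'], ["L2"]))
--     seeds = [str(num) for num in range(num_seeds)]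
--     hyper_params = {
--         "fewshot_lrs": lrs,
--         "fewshot_ks": ks,
--         "fewshot_epochs": epochs,
--         "weight_decay": wd,
--         "weight_decay_type": wdt,
--         "seeds": seeds,
--     }
--     num_jobs = len(lrs) * len(ks) * len(epochs) * len(wd) * len(wdt) * len(seeds)
--     return hyper_params, num_jobs
-- ===== Notes on version B (the rewrite author's own statement) =====
-- stated objective: faster
-- what changed: B is table-driven: the per-size base grids live in one lookup table, the dict is assembled once from the looked-up tuple, and num_jobs is the closed-form product of the six list lengths instead of materializing the Cartesian product with itertools.product and taking its length.
import Mathlib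
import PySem

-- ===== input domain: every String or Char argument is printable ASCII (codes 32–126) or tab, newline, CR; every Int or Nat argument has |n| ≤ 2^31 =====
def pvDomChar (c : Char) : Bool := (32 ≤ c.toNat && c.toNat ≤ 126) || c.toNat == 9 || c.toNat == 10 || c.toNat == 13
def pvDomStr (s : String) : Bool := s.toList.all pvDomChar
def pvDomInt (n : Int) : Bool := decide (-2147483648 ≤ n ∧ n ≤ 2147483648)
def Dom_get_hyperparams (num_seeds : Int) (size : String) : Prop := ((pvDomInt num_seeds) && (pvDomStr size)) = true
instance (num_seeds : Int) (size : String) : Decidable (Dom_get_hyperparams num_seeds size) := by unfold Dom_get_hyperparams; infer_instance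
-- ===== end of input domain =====

-- B is table-driven (one lookup table of base grids, dict assembled once) and counts jobs
-- as the closed-form product of the list lengths instead of materializing the Cartesian product.

-- ===== PORT A =====
-- itertools.product(*lists): first list varies slowest, ported step for step
def pvProduct (ls : List (List String)) : List (List String) :=
  match ls with
  | [] => [[]]
  | l :: rest => l.flatMap (fun x => (pvProduct rest).map (fun t => x :: t))

def get_hyperparams (num_seeds : Int) (size : String) : (List (String × List String)) × Int :=
  let hyper_params :=
    if size = "small" then
      [("fewshot_lrs", ["0.1", "0.01", "0.001"]),
       ("fewshot_ks", ["-1"]),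
       ("fewshot_epochs", ["20"]),
       ("weight_decay", ["0.0"]),
       ("weight_decay_type", ["L2"]),
       ("seeds", (PySem.List.pyRange 0 num_seeds 1).map PySem.Int.toStr)]
    else if size = "imagenet1k" then
      [("fewshot_lrs", ["0.01", "0.001"]),
       ("fewshot_ks", ["-1"]),
       ("fewshot_epochs", ["20"]),
       ("weight_decay", ["1e-1", "1e-2", "1e-3", "1e-4", "1e-5", "1e-6"]),
       ("weight_decay_type", ["L2", "L1"]),
       ("seeds", (PySem.List.pyRange 0 num_seeds 1).map PySem.Int.toStr)]
    else
      [("fewshot_lrs", ["0.1", "0.01"]),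
       ("fewshot_ks", ["-1", "5", "10", "100"]),
       ("fewshot_epochs", ["10", "20", "30"]),
       ("weight_decay", ["0.0"]),
       ("weight_decay_type", ["L2"]),
       ("seeds", (PySem.List.pyRange 0 num_seeds 1).map PySem.Int.toStr)]
  let num_jobs : Int := (pvProduct (hyper_params.map Prod.snd)).length
  (hyper_params, num_jobs)

-- ===== PORT B =====
-- the per-size lookup table of Source B: table.get(size, default)
def pvTable (size : String) :
    List String × List String × List String × List String × List String :=
  (PySem.Dict.getD (PySem.Dict.ofList
    [("small", (["0.1", "0.01", "0.001"], ["-1"], ["20"], ["0.0"], ["L2"])),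
     ("imagenet1k", (["0.01", "0.001"], ["-1"], ["20"],
        ["1e-1", "1e-2", "1e-3", "1e-4", "1e-5", "1e-6"], ["L2", "L1"]))])
    size
    (["0.1", "0.01"], ["-1", "5", "10", "100"], ["10", "20", "30"], ["0.0"], ["L2"]))

def get_hyperparams_alt (num_seeds : Int) (size : String) : (List (String × List String)) × Int :=
  let t := pvTable size
  let lrs := t.1; let ks := t.2.1; let epochs := t.2.2.1
  let wd := t.2.2.2.1; let wdt := t.2.2.2.2
  let seeds := (PySem.List.pyRange 0 num_seeds 1).map PySem.Int.toStr
  let hyper_params :=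
    [("fewshot_lrs", lrs), ("fewshot_ks", ks), ("fewshot_epochs", epochs),
     ("weight_decay", wd), ("weight_decay_type", wdt), ("seeds", seeds)]
  let num_jobs : Int :=
    (lrs.length * ks.length * epochs.length * wd.length * wdt.length * seeds.length : Int)
  (hyper_params, num_jobs)

-- ===== PRECONDITION & SPEC =====
def Spec_get_hyperparams (num_seeds : Int) (size : String) (out : (List (String × List String)) × Int) : Prop := out = get_hyperparams_alt num_seeds size
instance (num_seeds : Int) (size : String) (out : (List (String × List String)) × Int) : Decidable (Spec_get_hyperparams num_seeds size out) := by unfold Spec_get_hyperparams; infer_instance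

-- ===== CLAIM (what is proved, stated in full; the proofs are below) =====
def Claim_equal_get_hyperparams : Prop := ∀ (num_seeds : Int) (size : String), Dom_get_hyperparams num_seeds size → Spec_get_hyperparams num_seeds size (get_hyperparams num_seeds size)

-- ===== LEMMAS AND PROOFS =====
theorem pvProduct_length (ls : List (List String)) :
    (pvProduct ls).length = (ls.map List.length).prod := by
  induction ls with
  | nil => simp [pvProduct]
  | cons l rest ih =>
    simp [pvProduct, List.length_flatMap, ih, List.map_const',
      List.sum_replicate, smul_eq_mul]

theorem pvTable_small :
    pvTable "small" = (["0.1", "0.01", "0.001"], ["-1"], ["20"], ["0.0"], ["L2"]) := by decide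

theorem pvTable_imagenet1k :
    pvTable "imagenet1k" =
      (["0.01", "0.001"], ["-1"], ["20"],
       ["1e-1", "1e-2", "1e-3", "1e-4", "1e-5", "1e-6"], ["L2", "L1"]) := by decide

theorem pvTable_other (size : String) (h1 : size ≠ "small") (h2 : size ≠ "imagenet1k") :
    pvTable size =
      (["0.1", "0.01"], ["-1", "5", "10", "100"], ["10", "20", "30"], ["0.0"], ["L2"]) := by
  have hmk : PySem.Dict.ofList
      [("small", ((["0.1", "0.01", "0.001"], ["-1"], ["20"], ["0.0"], ["L2"]) :
          List String × List String × List String × List String × List String)),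
       ("imagenet1k", (["0.01", "0.001"], ["-1"], ["20"],
          ["1e-1", "1e-2", "1e-3", "1e-4", "1e-5", "1e-6"], ["L2", "L1"]))] =
      PySem.Dict.mk
      [("small", (["0.1", "0.01", "0.001"], ["-1"], ["20"], ["0.0"], ["L2"])),
       ("imagenet1k", (["0.01", "0.001"], ["-1"], ["20"],
          ["1e-1", "1e-2", "1e-3", "1e-4", "1e-5", "1e-6"], ["L2", "L1"]))] := by decide
  unfold pvTable
  rw [hmk]
  simp [PySem.Dict.getD, beq_iff_eq, Ne.symm h1, Ne.symm h2,
    PySem.Dict.get?]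

theorem ports_agree (num_seeds : Int) (size : String) :
    get_hyperparams num_seeds size = get_hyperparams_alt num_seeds size := by
  by_cases h1 : size = "small"
  · subst h1
    unfold get_hyperparams get_hyperparams_alt
    simp [pvTable_small, pvProduct_length]
  · by_cases h2 : size = "imagenet1k"
    · subst h2
      unfold get_hyperparams get_hyperparams_alt
      simp [h1, pvTable_imagenet1k, pvProduct_length]; ring
    · unfold get_hyperparams get_hyperparams_alt
      simp [h1, h2, pvTable_other size h1 h2, pvProduct_length]; ring

-- ===== VERDICT (by name: the statement is the Claim_ definition above) =====
theorem get_hyperparams_spec : Claim_equal_get_hyperparams := by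
  intro n s _
  exact ports_agree n s
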